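/- GENERATED by tools/from_farm_form.py from farm/worked/memcmp/Proof.lean (a worked proof of the farm's unit `memcmp`,
   accepted by the verdict) — do not edit. -/
import Asan.CheckWalk
import ProgX.Base.Spec.Units.memcmp

open X86 X86.User Asan ProgX.Base

set_option maxRecDepth 4000
set_option maxHeartbeats 4000000

namespace ProgX.Base.Spec.Proved.memcmp
open ProgX.Base.Spec.memcmp (Statement)

/-- The byte that `movzx` loads and `cmp r15b, dl` compares (0x101629, libc.c:31): a byte read is its own low byte. -/
theorem low_byte_w (x : Nat) (hx : x < 256) :
    (BitVec.setWidth 8 (BitVec.zeroExtend 32 (BitVec.ofNat 8 x))).toNat = x := by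
  simp only [BitVec.toNat_setWidth, BitVec.zeroExtend, BitVec.toNat_ofNat, Nat.reducePow]
  omega

/-- `sub eax, edx` of two zero-extended bytes (0x101635, libc.c:32): the low 32 bits of the result are 0 exactly when the
bytes are equal. -/
theorem diff_zero_iff_w (x y : Nat) (hx : x < 256) (hy : y < 256) :
    (Word.ofBV
      (BitVec.zeroExtend 32 (BitVec.setWidth 8 (BitVec.zeroExtend 32 (BitVec.ofNat 8 x))) -
        BitVec.zeroExtend 32 (BitVec.setWidth 8 (BitVec.zeroExtend 32 (BitVec.ofNat 8 y))))).toNat % 2 ^ 32 = 0 ↔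
      x = y := by
  show (Word.ofBV _).toBitVec.toNat % 2 ^ 32 = 0 ↔ x = y
  rw [X86.Word.toBitVec_ofBV]
  simp only [BitVec.toNat_setWidth, BitVec.zeroExtend, BitVec.toNat_ofNat, BitVec.toNat_sub, Nat.reducePow]
  omega

/-- Where_w a live range of `n > 0` bytes at `a` is, as the one arithmetic fact the walk needs: above the text, below the
shadow, and off this function's stack (below `rsp + 8`). -/
def Where_w (rsp a n : Nat) : Prop :=
  0x140000 ≤ a ∧ a + n ≤ 0xC00000 ∧ (rsp + 8 ≤ a ∨ a + n ≤ 0x700000 ∨ 0x800000 ≤ a)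

end ProgX.Base.Spec.Proved.memcmp

/-- `memcmp` satisfies its contract: six pushes and `sub rsp, 8`, a loop (`u_loop` / `u_loop_back`) with two check calls and
two byte loads inside, two ways out (all `n` bytes equal: `eax = 0`; a difference at `i`: `eax = a[i] − b[i] ≠ 0`), pops, ret. -/
theorem ProgX.Base.Spec.Proved.memcmp_ok : ProgX.Base.Spec.memcmp.Statement := by
  intro Lay hLay μ hμ u₀ hcode hload1 others frames u ret he hpre
  v_entry he
  obtain ⟨hsh, hlive⟩ := hpre
  -- where the two ranges are: one arithmetic fact each
  have hsp := hsh.rsp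
  have hwhere : (u.reg .rdx).toNat = 0 ∨
      (ProgX.Base.Spec.Proved.memcmp.Where_w (u.reg .rsp).toNat (u.reg .rdi).toNat (u.reg .rdx).toNat ∧
       ProgX.Base.Spec.Proved.memcmp.Where_w (u.reg .rsp).toNat (u.reg .rsi).toNat (u.reg .rdx).toNat) := by
    rcases hlive with h0 | ⟨hla, hlb⟩
    · exact Or.inl h0
    · by_cases hn : (u.reg .rdx).toNat = 0
      · exact Or.inl hn
      · exact Or.inr ⟨hla.where_ hsh.inv hsh.offText (by omega), hlb.where_ hsh.inv hsh.offText (by omega)⟩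
  unfold ProgX.Base.Spec.Proved.memcmp.Where_w at hwhere
  u_walk hcode [hμ.vendor] until [ProgX.Base.L.memcmp.loop1] span [ProgX.Base.L.textLo, ProgX.Base.L.textHi] side (v_side)
  -- the loop head 0x101602 (libc.c:30 `for (i = 0; i < n; i++)`): what varies is generalised, the exact memory is replaced
  -- by what stays true
  obtain ⟨i, hi, hile, heq⟩ : ∃ i : Nat, s_1015fc.reg .rbx = UInt64.ofNat i ∧ i ≤ (u.reg .rdx).toNat ∧
      ∀ j, j < i → u.mem.readLE (u.reg .rdi + UInt64.ofNat j) 1 = u.mem.readLE (u.reg .rsi + UInt64.ofNat j) 1 :=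
    ⟨0, w_rbx, Nat.zero_le _, fun j hj => absurd hj (Nat.not_lt_zero j)⟩
  have hsame : Mem.SameExcept [⟨(u.reg .rsp).toNat - 64, (u.reg .rsp).toNat⟩] u.mem s_1015fc.mem := by
    u_same
  have hun : ShadowUntouched u.mem s_1015fc.mem := by v_untouched
  have hs1 : UInt64.ofNat (s_1015fc.mem.readLE (u.reg .rsp - 8) 8) = u.reg .r15 := by u_resolve
  have hs2 : UInt64.ofNat (s_1015fc.mem.readLE (u.reg .rsp - 16) 8) = u.reg .r14 := by u_resolve
  have hs3 : UInt64.ofNat (s_1015fc.mem.readLE (u.reg .rsp - 24) 8) = u.reg .r13 := by u_resolve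
  have hs4 : UInt64.ofNat (s_1015fc.mem.readLE (u.reg .rsp - 32) 8) = u.reg .r12 := by u_resolve
  have hs5 : UInt64.ofNat (s_1015fc.mem.readLE (u.reg .rsp - 40) 8) = u.reg .rbp := by u_resolve
  have hs6 : UInt64.ofNat (s_1015fc.mem.readLE (u.reg .rsp - 48) 8) = u.reg .rbx := by u_resolve
  have hs0 : UInt64.ofNat (s_1015fc.mem.readLE (u.reg .rsp) 8) = ret := by u_resolve
  have hdf : s_1015fc.flags .df = false := by
    rw [w_flags]
    simp only [X86.User.df_setStatus]
    exact he_df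
  replace w_kept := w_kept.mono_all (S' := [.rbx, .r12, .r13, .r14, .r15, .rsp, .rbp, .rdi, .rax, .rdx]) (by rfl)
  clear w_mem w_flags w_rbx
  u_loop [i] (fun v => (u.reg .rdx).toNat - (v.reg .rbx).toNat)
  u_walk hcode [hμ.vendor] until [ProgX.Base.L.memcmp.loop1] span [ProgX.Base.L.textLo, ProgX.Base.L.textHi] side (v_side)
  · -- 0x10160e, the check of the load `p[i]` (libc.c:31): the byte is inside the range at `a`
    obtain ⟨hla, hlb⟩ := hlive.resolve_left (by u_omega)
    obtain ⟨⟨ha1, ha2, ha3⟩, hb1, hb2, hb3⟩ := hwhere.resolve_left (by u_omega)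
    have hun' : ShadowUntouched u.mem s_10160e.mem := by v_untouched
    exact hla.accSmall hsh.inv hun' _ 1 (by decide) (by u_omega) (by u_omega)
  · -- 0x101620, the check of the load `q[i]` (libc.c:31): the byte is inside the range at `b`
    obtain ⟨hla, hlb⟩ := hlive.resolve_left (by u_omega)
    obtain ⟨⟨ha1, ha2, ha3⟩, hb1, hb2, hb3⟩ := hwhere.resolve_left (by u_omega)
    have hun' : ShadowUntouched u.mem s_101620.mem := by v_untouched
    exact hlb.accSmall hsh.inv hun' _ 1 (by decide) (by u_omega) (by u_omega)
  · -- the exit `i ≥ n` (0x101639, libc.c:35 `return 0`), walked to the `ret`: every byte below `n` was equal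
    refine ReachVia.done (Or.inl ?_)
    v_returned
    refine ⟨by rw [w_mem]; exact hun, ?_⟩
    have hni : (u.reg .rdx).toNat ≤ i := by u_omega
    rw [w_rax]
    refine ⟨fun _ j hj => heq j (by omega), fun _ => ?_⟩
    rfl
  · -- the back edge (0x10162c `je` taken, 0x1015fe `add rbx, 1`): `p[i] = q[i]`
    obtain ⟨⟨ha1, ha2, ha3⟩, hb1, hb2, hb3⟩ := hwhere.resolve_left (by u_omega)
    have hra : s_1015fc.mem.readLE (u.reg .rdi + UInt64.ofNat i) 1 = u.mem.readLE (u.reg .rdi + UInt64.ofNat i) 1 := by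
      refine hsame.readLE _ 1 (by u_omega) ?_
      intro w hw
      simp only [List.mem_singleton] at hw
      subst hw
      show _ ≤ (u.reg .rsp).toNat - 64 ∨ (u.reg .rsp).toNat ≤ _
      u_omega
    have hrb : s_1015fc.mem.readLE (u.reg .rsi + UInt64.ofNat i) 1 = u.mem.readLE (u.reg .rsi + UInt64.ofNat i) 1 := by
      refine hsame.readLE _ 1 (by u_omega) ?_
      intro w hw
      simp only [List.mem_singleton] at hw
      subst hw
      show _ ≤ (u.reg .rsp).toNat - 64 ∨ (u.reg .rsp).toNat ≤ _
      u_omega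
    rw [hra, hrb, ProgX.Base.Spec.Proved.memcmp.low_byte_w _ (Mem.readLE_lt _ _ _),
      ProgX.Base.Spec.Proved.memcmp.low_byte_w _ (Mem.readLE_lt _ _ _)] at hbr_10162c
    u_loop_back [i + 1]
    · rw [w_rbx, UInt64.ofNat_add]
      rfl
    · u_omega
    · -- the bytes compared so far: those below `i` by the invariant, the one at `i` by the `je`
      intro j hj
      by_cases hji : j = i
      · subst hji
        exact hbr_10162c
      · exact heq j (by omega)
    · -- still no store to the shadow
      v_untouched
    · -- the direction flag: the check kept it (`w_df_101620`), `cmp` and `add` wrote status flags only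
      rw [w_flags]
      simp only [X86.User.df_setStatus]
      assumption
    · rw [w_rbx]
      u_omega
  · -- the exit at a difference (0x10162e, libc.c:32 `return (int) p[i] - (int) q[i]`), walked to the `ret`: `eax ≠ 0`
    obtain ⟨⟨ha1, ha2, ha3⟩, hb1, hb2, hb3⟩ := hwhere.resolve_left (by u_omega)
    have hra : s_1015fc.mem.readLE (u.reg .rdi + UInt64.ofNat i) 1 = u.mem.readLE (u.reg .rdi + UInt64.ofNat i) 1 := by
      refine hsame.readLE _ 1 (by u_omega) ?_
      intro w hw
      simp only [List.mem_singleton] at hw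
      subst hw
      show _ ≤ (u.reg .rsp).toNat - 64 ∨ (u.reg .rsp).toNat ≤ _
      u_omega
    have hrb : s_1015fc.mem.readLE (u.reg .rsi + UInt64.ofNat i) 1 = u.mem.readLE (u.reg .rsi + UInt64.ofNat i) 1 := by
      refine hsame.readLE _ 1 (by u_omega) ?_
      intro w hw
      simp only [List.mem_singleton] at hw
      subst hw
      show _ ≤ (u.reg .rsp).toNat - 64 ∨ (u.reg .rsp).toNat ≤ _
      u_omega
    rw [hra, hrb, ProgX.Base.Spec.Proved.memcmp.low_byte_w _ (Mem.readLE_lt _ _ _),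
      ProgX.Base.Spec.Proved.memcmp.low_byte_w _ (Mem.readLE_lt _ _ _)] at hbr_10162c
    have hin : i < (u.reg .rdx).toNat := by u_omega
    refine ReachVia.done (Or.inl ?_)
    v_returned
    refine ⟨by v_untouched, ?_⟩
    rw [w_rax, hra, hrb, ProgX.Base.Spec.Proved.memcmp.diff_zero_iff_w _ _ (Mem.readLE_lt _ _ _) (Mem.readLE_lt _ _ _)]
    exact ⟨fun h => absurd h hbr_10162c, fun h => h i hin⟩
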